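-- pv_equiv track=rewrite | github.com/zhenyulincs/rlix | schedrl/scheduler/types.py | build_dp_rank_mapping
-- ===== SOURCE A (Python) =====
-- from typing import Any, Dict, List, Optional, Set, Tuple
--
-- def build_dp_rank_mapping(gpu_ids: List[int], tp_size: int) -> Dict[int, List[int]]:
--     if tp_size <= 0:
--         return {}
--     sorted_gpus = sorted(gpu_ids)
--     mapping: Dict[int, List[int]] = {}
--     for i in range(0, len(sorted_gpus), tp_size):
--         dp_rank = i // tp_size
--         mapping[dp_rank] = sorted_gpus[i : i + tp_size]
--     return mapping
-- ===== SOURCE B (Python) =====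
-- from typing import Dict, List
--
-- def build_dp_rank_mapping(gpu_ids: List[int], tp_size: int) -> Dict[int, List[int]]:
--     if tp_size <= 0:
--         return {}
--     mapping: Dict[int, List[int]] = {}
--     chunk: List[int] = []
--     for gpu in sorted(gpu_ids):
--         chunk.append(gpu)
--         if len(chunk) == tp_size:
--             mapping[len(mapping)] = chunk
--             chunk = []
--     if chunk:
--         mapping[len(mapping)] = chunk
--     return mapping
-- ===== Notes on version B (the rewrite author's own statement) =====
-- stated objective: alternative
-- what changed: Replaces the stride-index loop that slices sorted_gpus[i:i+tp_size] and keys by i//tp_size with a single element-wise pass that accumulates a current chunk and flushes it to mapping[len(mapping)] whenever it reaches tp_size (plus a final flush), eliminating all index arithmetic and slicing.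
import Mathlib
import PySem

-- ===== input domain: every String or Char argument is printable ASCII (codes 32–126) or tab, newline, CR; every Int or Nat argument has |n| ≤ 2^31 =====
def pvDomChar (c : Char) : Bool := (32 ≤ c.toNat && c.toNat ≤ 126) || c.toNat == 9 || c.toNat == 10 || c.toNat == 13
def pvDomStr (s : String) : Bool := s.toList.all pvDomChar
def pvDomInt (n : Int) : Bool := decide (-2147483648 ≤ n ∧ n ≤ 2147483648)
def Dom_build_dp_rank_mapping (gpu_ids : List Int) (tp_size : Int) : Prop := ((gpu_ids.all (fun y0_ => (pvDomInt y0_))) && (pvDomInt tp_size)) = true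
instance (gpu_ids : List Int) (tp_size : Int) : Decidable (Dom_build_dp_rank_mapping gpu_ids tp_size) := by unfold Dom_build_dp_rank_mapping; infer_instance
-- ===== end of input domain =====

-- B makes a single element-wise pass over the sorted GPUs, accumulating a current chunk and
-- flushing it under the next fresh key whenever it fills (plus a final flush), instead of A's
-- stride-index slicing loop; same result, no index arithmetic (objective: alternative).

-- ===== PORT A =====
def build_dp_rank_mapping (gpu_ids : List Int) (tp_size : Int) : List (Int × List Int) :=
  if tp_size ≤ 0 then [] else
    let sorted_gpus := PySem.List.sorted gpu_ids (fun x => x) false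
    let mapping := (PySem.List.pyRange 0 (sorted_gpus.length : Int) tp_size).foldl
      (fun m i => m.insert (PySem.Int.floordiv i tp_size)
        (PySem.List.slice sorted_gpus (some i) (some (i + tp_size)))) PySem.Dict.empty
    mapping.items

-- ===== PORT B =====
-- B's dict only ever receives the fresh key len(mapping), so 'mapping[len(mapping)] = chunk' is
-- exactly appending the pair to the association list (the dict in insertion order).
def build_dp_rank_mapping_alt (gpu_ids : List Int) (tp_size : Int) : List (Int × List Int) :=
  if tp_size ≤ 0 then [] else
    let st := (PySem.List.sorted gpu_ids (fun x => x) false).foldl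
      (fun (st : List (Int × List Int) × List Int) gpu =>
        if ((st.2 ++ [gpu]).length : Int) = tp_size then
          (st.1 ++ [((st.1.length : Int), st.2 ++ [gpu])], [])
        else (st.1, st.2 ++ [gpu])) ([], [])
    if st.2 = [] then st.1 else st.1 ++ [((st.1.length : Int), st.2)]

-- ===== PRECONDITION & SPEC =====
def Spec_build_dp_rank_mapping (gpu_ids : List Int) (tp_size : Int) (out : List (Int × List Int)) : Prop := out = build_dp_rank_mapping_alt gpu_ids tp_size
instance (gpu_ids : List Int) (tp_size : Int) (out : List (Int × List Int)) : Decidable (Spec_build_dp_rank_mapping gpu_ids tp_size out) := by unfold Spec_build_dp_rank_mapping; infer_instance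

-- ===== CLAIM (what is proved, stated in full; the proofs are below) =====
def Claim_equal_build_dp_rank_mapping : Prop := ∀ (gpu_ids : List Int) (tp_size : Int), Dom_build_dp_rank_mapping gpu_ids tp_size → Spec_build_dp_rank_mapping gpu_ids tp_size (build_dp_rank_mapping gpu_ids tp_size)

-- ===== LEMMAS AND PROOFS =====

-- the common specification: the list of (rank, block) pairs, block k = s[k*T : k*T+T]
def pvChunks (s : List Int) (T : Nat) : List (Int × List Int) :=
  (List.range ((s.length + T - 1) / T)).map (fun (k : Nat) => ((k : Int), (s.drop (k * T)).take T))

theorem pvA_items (s : List Int) (T : Nat) (hT : 0 < T) :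
    ((PySem.List.pyRange 0 (s.length : Int) (T : Int)).foldl
      (fun m i => m.insert (PySem.Int.floordiv i (T : Int))
        (PySem.List.slice s (some i) (some (i + (T : Int))))) PySem.Dict.empty).items
    = pvChunks s T := by
  have hTi : (0:Int) < (T:Int) := by exact_mod_cast hT
  rw [PySem.List.pyRange_of_pos 0 (s.length : Int) hTi]
  have hcount : (if (0:Int) < (s.length:Int) then (((s.length:Int) - 0 + (T:Int) - 1)/(T:Int)).toNat else 0) = (s.length + T - 1)/T := by
    by_cases hn : 0 < s.length
    · rw [if_pos (by exact_mod_cast hn)]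
      have h1 : ((s.length:Int) - 0 + (T:Int) - 1) = ((s.length + T - 1 : Nat) : Int) := by omega
      rw [h1, ← Int.natCast_div]
      exact Int.toNat_natCast _
    · rw [if_neg (by simpa using hn)]
      symm; apply Nat.div_eq_of_lt; omega
  rw [hcount, List.foldl_map]
  have hkey : ∀ j : Nat, PySem.Int.floordiv (0 + (T:Int)*(j:Int)) (T:Int) = (j:Int) := by
    intro j
    have h1 : (0 + (T:Int)*(j:Int)) = ((T*j : Nat):Int) := by push_cast; ring
    rw [h1, PySem.Int.floordiv_natCast, Nat.mul_div_cancel_left _ hT]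
  rw [PySem.Dict.items_foldl_insert_fresh _ _ _ _
      (fun a _ => by simp [PySem.Dict.contains_empty])
      (by
        rw [List.map_congr_left (fun (j : Nat) _ => hkey j)]
        exact List.nodup_range.map (fun a b h => by exact_mod_cast h))]
  unfold pvChunks
  simp only [PySem.Dict.empty, List.nil_append]
  apply List.map_congr_left
  intro j _
  rw [hkey j]
  have h1 : (0 + (T:Int)*(j:Int)) = ((j*T : Nat):Int) := by push_cast; ring
  rw [h1, PySem.List.slice_natCast_add s (j*T) T]

-- B-side specification recursion: peel one block at a time
def pvChunkRec (s : List Int) (T : Nat) (k : Int) : List (Int × List Int) :=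
  match s with
  | [] => []
  | x :: rest => (k, x :: rest.take (T-1)) :: pvChunkRec (rest.drop (T-1)) T (k+1)
termination_by s.length
decreasing_by simp

theorem pvChunkRec_nil (T : Nat) (k : Int) : pvChunkRec [] T k = [] := by
  rw [pvChunkRec.eq_def]

theorem pvChunkRec_cons (s : List Int) (T : Nat) (hT : 0 < T) (k : Int) (hs : s ≠ []) :
    pvChunkRec s T k = (k, s.take T) :: pvChunkRec (s.drop T) T (k+1) := by
  match s with
  | [] => exact absurd rfl hs
  | x :: rest =>
    match T, hT with
    | (m+1), _ =>
      rw [pvChunkRec.eq_def]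
      simp

theorem pvChunkRec_eq_chunks (T : Nat) (hT : 0 < T) : ∀ (s : List Int),
    pvChunkRec s T 0 = pvChunks s T := by
  have key : ∀ (n : Nat) (s : List Int), s.length ≤ n → ∀ (k : Nat),
      pvChunkRec s T (k : Int) = (List.range ((s.length + T - 1)/T)).map
        (fun (j : Nat) => (((k + j : Nat) : Int), (s.drop (j*T)).take T)) := by
    intro n
    induction n with
    | zero =>
      intro s hs k
      have : s = [] := List.eq_nil_of_length_eq_zero (by omega)
      subst this
      simp [pvChunkRec_nil, Nat.div_eq_of_lt (show T - 1 < T by omega)]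
    | succ n ih =>
      intro s hs k
      match s with
      | [] => simp [pvChunkRec_nil, Nat.div_eq_of_lt (show T - 1 < T by omega)]
      | x :: rest =>
        rw [pvChunkRec_cons _ T hT _ (by simp)]
        have hlen : (List.drop T (x :: rest)).length = (x :: rest).length - T := by simp
        have hcnt : ((x :: rest).length + T - 1)/T = ((List.drop T (x :: rest)).length + T - 1)/T + 1 := by
          rw [hlen]
          by_cases hcase : T ≤ (x :: rest).length
          · have h1 : (x :: rest).length + T - 1 = ((x :: rest).length - T + T - 1) + T := by omega
            rw [h1, Nat.add_div_right _ hT]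
          · have h1 : (x :: rest).length - T = 0 := by omega
            rw [h1]
            have h2 : ((x :: rest).length + T - 1)/T = 1 := by
              rw [Nat.div_eq_iff hT]; simp only [List.length_cons] at hcase ⊢; omega
            rw [h2, Nat.div_eq_of_lt (by omega)]
        have hk1 : ((k : Int) + 1) = (((k+1 : Nat)) : Int) := by push_cast; ring
        rw [hk1, ih (List.drop T (x :: rest)) (by simp only [List.length_drop, List.length_cons] at *; omega) (k+1)]
        rw [hcnt, List.range_succ_eq_map, List.map_cons, List.map_map]
        congr 1
        · simp
        · apply List.map_congr_left
          intro j _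
          simp only [Function.comp]
          congr 2
          · omega
          · rw [List.drop_drop]
            congr 1
            rw [Nat.succ_eq_add_one, Nat.add_mul]
            omega
  intro s
  have h0 : (0 : Int) = ((0 : Nat) : Int) := rfl
  rw [h0, key s.length s le_rfl 0]
  unfold pvChunks
  apply List.map_congr_left
  intro j _
  simp

-- the loop invariant for B's fold: with a partial chunk c (|c| < T) and already-emitted mapping acc,
-- the flushed result is acc followed by the chunks of c ++ s keyed from acc.length
theorem pvB_inv (T : Nat) (hT : 0 < T) : ∀ (s : List Int) (acc : List (Int × List Int)) (c : List Int),
    c.length < T →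
    (fun (st : List (Int × List Int) × List Int) =>
      if st.2 = [] then st.1 else st.1 ++ [((st.1.length : Int), st.2)])
    (s.foldl
      (fun (st : List (Int × List Int) × List Int) gpu =>
        if ((st.2 ++ [gpu]).length : Int) = (T : Int) then
          (st.1 ++ [((st.1.length : Int), st.2 ++ [gpu])], [])
        else (st.1, st.2 ++ [gpu])) (acc, c))
    = acc ++ pvChunkRec (c ++ s) T (acc.length : Int) := by
  intro s
  induction s with
  | nil =>
    intro acc c hc
    simp only [List.foldl_nil, List.append_nil]
    by_cases h : c = []
    · subst h; simp [pvChunkRec_nil]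
    · rw [pvChunkRec_cons c T hT _ h]
      have h1 : c.take T = c := List.take_of_length_le (by omega)
      have h2 : c.drop T = [] := List.drop_eq_nil_of_le (by omega)
      rw [h1, h2, pvChunkRec_nil]
      simp [h]
  | cons g rest ih =>
    intro acc c hc
    rw [List.foldl_cons]
    by_cases h : (((c ++ [g]).length : Nat) : Int) = (T : Int)
    · have hlen : (c ++ [g]).length = T := by exact_mod_cast h
      rw [if_pos h, ih (acc ++ [((acc.length : Int), c ++ [g])]) [] hT]
      have hassoc : c ++ g :: rest = (c ++ [g]) ++ rest := by simp
      have htake : ((c ++ [g]) ++ rest).take T = c ++ [g] := by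
        rw [← hlen]; exact List.take_left
      have hdrop : ((c ++ [g]) ++ rest).drop T = rest := by
        rw [← hlen]; exact List.drop_left
      rw [hassoc, pvChunkRec_cons ((c ++ [g]) ++ rest) T hT _ (by simp), htake, hdrop]
      have hL : (((acc ++ [((acc.length : Int), c ++ [g])]).length : Nat) : Int) = (acc.length : Int) + 1 := by
        simp
      rw [hL, List.nil_append, List.append_assoc, List.singleton_append]
    · have hlen : (c ++ [g]).length ≠ T := fun hh => h (by exact_mod_cast hh)
      have hlt : (c ++ [g]).length < T := by simp at hlen ⊢; omega
      rw [if_neg h, ih acc (c ++ [g]) hlt]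
      rw [List.append_assoc]
      rfl

-- ===== VERDICT (by name: the statement is the Claim_ definition above) =====
theorem build_dp_rank_mapping_spec : Claim_equal_build_dp_rank_mapping := by
  intro gpu_ids tp_size _
  unfold Spec_build_dp_rank_mapping build_dp_rank_mapping build_dp_rank_mapping_alt
  by_cases h : tp_size ≤ 0
  · simp [h]
  · simp only [h, if_false]
    have hts : ((tp_size.toNat : Nat) : Int) = tp_size := Int.toNat_of_nonneg (by omega)
    have hT : 0 < tp_size.toNat := by omega
    rw [← hts]
    rw [pvA_items _ _ hT]
    have hinv := pvB_inv tp_size.toNat hT (PySem.List.sorted gpu_ids (fun x => x) false) [] []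
      hT
    simp only [List.nil_append, List.length_nil, Nat.cast_zero] at hinv
    rw [hinv, pvChunkRec_eq_chunks _ hT]
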